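-- pv_equiv track=rewrite | github.com/nOctaveLay/Algorithm | 코딩 테스트 준비 문제/bfs 알고리즘/17071.py | solution
-- ===== SOURCE A (Python) =====
-- from collections import deque
--
-- def solution(subin_init:int, brother_init:int):
--     q = deque()
--     visited = [[-1, -1] for _ in range(500001)]
--     q.append((subin_init,0))
--     brother = brother_init
--     visited[subin_init][0] = 0
--     if subin_init == brother: return 0
--     while q:
--         nxt_q = deque()
--         for _ in range(len(q)):
--             subin, time = q.popleft()
--             time += 1
--             # subin 이동
--             for next_subin in [subin - 1, subin + 1, subin * 2]:
--                 if next_subin < 0 or next_subin > 500000: continue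
--                 if visited[next_subin][time % 2] > -1: continue
--                 nxt_q.append((next_subin, time))
--                 visited[next_subin][time % 2] = time
--             if not q:
--                 q, nxt_q = nxt_q, deque()
--         # brother 이동
--         brother += time
--         if brother > 500000: return -1
--         if visited[brother][time % 2] >= 0:
--             return time
--     return -1
-- ===== SOURCE B (Python) =====
-- def solution(subin_init: int, brother_init: int):
--     # Bit-parallel reachability DP: cur is a bitmask of the positions Subin can
--     # occupy at time t (one bit per position 0..500000).  The +-1 moves are bit
--     # shifts; the doubling move is accumulated incrementally (per parity) since
--     # the per-parity occupancy sets only grow over time.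
--     LIMIT = 500000
--     FULL = (1 << (LIMIT + 1)) - 1
--     LOW = (1 << (LIMIT // 2 + 1)) - 1
--     cur = 1 << subin_init
--     seen = [0, 0]   # sources (<= 250000) already doubled, per source parity
--     dbl = [0, 0]    # accumulated doubled targets, per target parity
--     brother = brother_init
--     t = 0
--     while True:
--         if brother <= LIMIT and (cur >> brother) & 1:
--             return t
--         m = cur & LOW
--         new = m ^ (m & seen[t & 1])
--         seen[t & 1] = m
--         d = dbl[1 - (t & 1)]
--         while new:
--             p = new.bit_length() - 1
--             d |= 1 << (2 * p)
--             new -= 1 << p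
--         dbl[1 - (t & 1)] = d
--         t += 1
--         brother = brother_init + t * (t + 1) // 2
--         if brother > LIMIT:
--             return -1
--         cur = (((cur << 1) | (cur >> 1)) & FULL) | d
-- ===== Notes on version B (the rewrite author's own statement) =====
-- stated objective: alternative
-- what changed: A runs a queue-based BFS with a per-position distance/visited table, level by level, checking the brother inside the loop; B keeps no queue, no distances and no per-cell table at all: it maintains a single big-integer bitmask of the positions occupied at time t and advances it bit-parallel each step (+-1 moves are whole-mask shifts, the doubling move is an incrementally accumulated per-parity doubled-target mask, sound because per-parity occupancy sets only grow), testing the brother's closed-form position b0+t(t+1)//2 against one bit.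
-- outside the precondition, e.g. on solution(-1, 5): A returns 9, B raises ValueError; on solution(-500001, 0): A returns -1, B raises ValueError; on solution(3, -2): A returns 2, B raises ValueError
import Mathlib
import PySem

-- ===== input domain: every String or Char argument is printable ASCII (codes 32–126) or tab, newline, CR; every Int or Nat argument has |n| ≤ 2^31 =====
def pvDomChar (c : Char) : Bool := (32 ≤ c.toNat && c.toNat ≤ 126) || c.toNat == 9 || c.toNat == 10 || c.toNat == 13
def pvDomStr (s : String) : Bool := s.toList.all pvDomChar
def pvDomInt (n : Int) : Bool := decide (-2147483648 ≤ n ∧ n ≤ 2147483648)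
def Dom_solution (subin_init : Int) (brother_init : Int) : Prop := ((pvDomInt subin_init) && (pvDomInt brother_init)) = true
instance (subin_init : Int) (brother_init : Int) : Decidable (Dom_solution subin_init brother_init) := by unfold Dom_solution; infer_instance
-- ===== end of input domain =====

-- B replaces A's queue-based level BFS with a bit-parallel reachability DP: one big
-- bitmask of occupied positions per time step (±1 = shifts, doubling = an accumulated
-- per-parity doubled-target mask); same return value on Pre_ (objective: alternative).

-- ===== PORT A =====
-- The Python `visited` list of [int,int] pairs is ported by hand as an Array (Int × Int)
-- (PySem has no mutable-list primitive); indexing via Int.toNat is exact for the indices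
-- actually used under Pre_ (0 ≤ index ≤ 500000).
-- Python's negative-index wraparound for a list of length 500001
def pyIdx (p : Int) : Nat := (if p < 0 then p + 500001 else p).toNat

def vget (v : Array (Int × Int)) (p : Int) (pi : Int) : Int :=
  let e := v.getD (pyIdx p) ((-1 : Int), (-1 : Int))
  if pi = 0 then e.1 else e.2

def vset (v : Array (Int × Int)) (p : Int) (pi : Int) (x : Int) : Array (Int × Int) :=
  v.modify (pyIdx p) (fun e => if pi = 0 then (x, e.2) else (e.1, x))

-- inner `for next_subin in [subin-1, subin+1, subin*2]` loop; the deque append is ported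
-- as cons onto an accumulator that is reversed at the end of the level (same order).
def apush (time : Int) (v : Array (Int × Int)) (acc : List (Int × Int)) :
    List Int → List (Int × Int) × Array (Int × Int)
  | [] => (acc, v)
  | ns :: rest =>
    if ns < 0 ∨ ns > 500000 then apush time v acc rest
    else if vget v ns (time % 2) > -1 then apush time v acc rest
    else apush time (vset v ns (time % 2) time) ((ns, time) :: acc) rest

-- `for _ in range(len(q))` over one level (the q/nxt_q swap happens exactly when the
-- level is exhausted, so one level is processed per iteration of the while loop).
def alevel : List (Int × Int) → Array (Int × Int) → List (Int × Int) → Int →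
    List (Int × Int) × Array (Int × Int) × Int
  | [], v, acc, time => (acc.reverse, v, time)
  | (s, tm) :: rest, v, acc, _ =>
    let time := tm + 1
    let r := apush time v acc [s - 1, s + 1, s * 2]
    alevel rest r.2 r.1 time

-- the `while q` loop; fuel makes the recursion structural (inside Pre the loop exits
-- by `brother > 500000` after at most ~1000 rounds, far below the fuel).
def aloop : Nat → List (Int × Int) → Array (Int × Int) → Int → Int
  | 0, _, _, _ => -1
  | _ + 1, [], _, _ => -1
  | fuel + 1, (s, tm) :: rest, v, brother =>
    let r := alevel ((s, tm) :: rest) v [] 0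
    let brother2 := brother + r.2.2
    if brother2 > 500000 then -1
    else if vget r.2.1 brother2 (r.2.2 % 2) ≥ 0 then r.2.2
    else aloop fuel r.1 r.2.1 brother2

def solution (subin_init : Int) (brother_init : Int) : Int :=
  let v := vset (Array.replicate 500001 ((-1 : Int), (-1 : Int))) subin_init 0 0
  if subin_init = brother_init then 0
  else aloop 70000 [(subin_init, 0)] v brother_init

-- ===== PORT B =====
-- the inner `while new:` loop of Source B: `p = new.bit_length() - 1` is Nat.log2 for
-- new ≠ 0, `1 << k` is `1 <<< k`, `d |= x` is `d ||| x`, `new -= 1 << p` is Nat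
-- subtraction (exact: 2^p ≤ new).
def dblLoop (nw d : Nat) : Nat :=
  if h : nw = 0 then d
  else
    let p := nw.log2
    dblLoop (nw - 1 <<< p) (d ||| 1 <<< (2 * p))
decreasing_by
  simp only [Nat.one_shiftLeft]
  exact Nat.sub_lt (Nat.pos_of_ne_zero h) (Nat.two_pow_pos _)

-- the `while True:` loop of Source B; fuel makes it structural (inside Pre it returns by
-- `brother > 500000` after at most ~1000 rounds).  The Python bitmasks are Nats
-- (`cur >> brother` is exact for 0 ≤ brother, which Pre_ guarantees); `seen`/`dbl`
-- are the two-element Python lists split into (s0,s1)/(d0,d1), `t & 1` is `t % 2`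
-- (t ≥ 0 throughout), and `t*(t+1)//2` is Int division (exact: t ≥ 0).
def bloop : Nat → Int → Int → Nat → Nat → Nat → Nat → Nat → Int → Int
  | 0, _, _, _, _, _, _, _, _ => -1
  | fuel + 1, t, brother, cur, s0, s1, d0, d1, b0 =>
    if brother ≤ 500000 ∧ (cur >>> brother.toNat) &&& 1 = 1 then t
    else
      let m := cur &&& (1 <<< 250001 - 1)
      let seenT := if t % 2 = 0 then s0 else s1
      let nw := m ^^^ (m &&& seenT)
      let s0' := if t % 2 = 0 then m else s0
      let s1' := if t % 2 = 0 then s1 else m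
      let d := if t % 2 = 0 then d1 else d0
      let d' := dblLoop nw d
      let d0' := if t % 2 = 0 then d0 else d'
      let d1' := if t % 2 = 0 then d' else d1
      let t' := t + 1
      let brother' := b0 + t' * (t' + 1) / 2
      if brother' > 500000 then -1
      else bloop fuel t' brother' ((((cur <<< 1) ||| (cur >>> 1)) &&& (1 <<< 500001 - 1)) ||| d') s0' s1' d0' d1' b0

def solution_alt (subin_init : Int) (brother_init : Int) : Int :=
  bloop 70001 0 brother_init (1 <<< subin_init.toNat) 0 0 0 0 brother_init

-- ===== PRECONDITION & SPEC =====
-- Pre_ is the natural domain of the problem (BOJ 17071: 0 ≤ positions ≤ 500000).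
-- It excludes inputs on which A still returns: for subin_init in [-500001,-1] or
-- brother_init < 0 Python's negative-index wraparound makes A's answers an accident
-- of the table layout (B naturally raises ValueError on the negative shift there);
-- for subin_init outside [-500001,500000] A raises IndexError.
def Pre_solution (subin_init : Int) (brother_init : Int) : Prop :=
  0 ≤ subin_init ∧ subin_init ≤ 500000 ∧ 0 ≤ brother_init
instance (subin_init : Int) (brother_init : Int) : Decidable (Pre_solution subin_init brother_init) := by
  unfold Pre_solution; infer_instance

def pvWitness_solution : Int × Int := (5, 17)

def Spec_solution (subin_init : Int) (brother_init : Int) (out : Int) : Prop :=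
  out = solution_alt subin_init brother_init
instance (subin_init : Int) (brother_init : Int) (out : Int) : Decidable (Spec_solution subin_init brother_init out) := by
  unfold Spec_solution; infer_instance

-- ===== CLAIM (what is proved, stated in full; the proofs are below) =====
def Claim_equal_solution : Prop := ∀ (subin_init : Int) (brother_init : Int),
  Dom_solution subin_init brother_init → Pre_solution subin_init brother_init →
  Spec_solution subin_init brother_init (solution subin_init brother_init)

-- ===== LEMMAS AND PROOFS =====

-- abstract per-level BFS helpers (proof-only; `blevel` is one BFS level written
-- functionally, used to characterise what A's `alevel` does to the visited table)
def bpush (d : Int) (v : Array (Int × Int)) (nf : List Int) :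
    List Int → List Int × Array (Int × Int)
  | [] => (nf, v)
  | np :: rest =>
    if 0 ≤ np ∧ np ≤ 500000 ∧ vget v np (d % 2) = -1
    then bpush d (vset v np (d % 2) d) (np :: nf) rest
    else bpush d v nf rest

def blevel (d : Int) : List Int → Array (Int × Int) → List Int → List Int × Array (Int × Int)
  | [], v, nf => (nf.reverse, v)
  | p :: rest, v, nf =>
    let r := bpush d v nf [p - 1, p + 1, p * 2]
    blevel d rest r.2 r.1

-- abstract round-by-round BFS state (d, frontier, visited); freezes on empty frontier
def stepB : Int × List Int × Array (Int × Int) → Int × List Int × Array (Int × Int)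
  | (d, [], v) => (d, [], v)
  | (d, p :: rest, v) =>
    let r := blevel (d + 1) (p :: rest) v []
    (d + 1, r.1, r.2)

def initV (s : Int) : Array (Int × Int) :=
  vset (Array.replicate 500001 ((-1 : Int), (-1 : Int))) s 0 0

def st (s : Int) : Nat → Int × List Int × Array (Int × Int)
  | 0 => (0, [s], initV s)
  | k + 1 => stepB (st s k)

def Wd (s : Int) (k : Nat) : Array (Int × Int) := (st s k).2.2
def Fr (s : Int) (k : Nat) : List Int := (st s k).2.1

def INV (v : Array (Int × Int)) : Prop := ∀ p pi : Int, -1 ≤ vget v p pi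

-- ---------- array layer ----------
theorem size_vset (v : Array (Int × Int)) (p pi x : Int) : (vset v p pi x).size = v.size := by
  simp [vset]

theorem vget_vset_cases (v : Array (Int × Int)) (p pi x q rho : Int) :
    vget (vset v p pi x) q rho = vget v q rho ∨ vget (vset v p pi x) q rho = x := by
  simp only [vget, vset, Array.getD_eq_getD_getElem?, Array.getElem?_modify]
  by_cases h1 : pyIdx p = pyIdx q
  · simp only [h1]
    cases hc : v[pyIdx q]? <;> by_cases hr : rho = 0 <;> by_cases hpi : pi = 0 <;>
      simp [hr, hpi]
  · simp [h1]

theorem vget_vset_self (v : Array (Int × Int)) (p pi x : Int)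
    (hsz : pyIdx p < v.size) :
    vget (vset v p pi x) p pi = x := by
  have hg : v[pyIdx p]? = some v[pyIdx p] := getElem?_pos v (pyIdx p) hsz
  simp only [vget, vset, Array.getD_eq_getD_getElem?, Array.getElem?_modify, hg]
  split_ifs <;> simp

theorem vget_vset_ne (v : Array (Int × Int)) (p pi x q rho : Int)
    (hp : 0 ≤ p) (hq : 0 ≤ q)
    (h : p ≠ q ∨ ((pi = 0) ↔ ¬(rho = 0))) :
    vget (vset v p pi x) q rho = vget v q rho := by
  simp only [vget, vset, Array.getD_eq_getD_getElem?, Array.getElem?_modify]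
  rcases h with h | h
  · have : pyIdx p ≠ pyIdx q := by simp only [pyIdx]; omega
    simp [this]
  · by_cases h1 : pyIdx p = pyIdx q
    · simp only [h1]
      cases hc : v[pyIdx q]? <;> by_cases hr : rho = 0 <;> simp_all
    · simp [h1]

theorem INV_vset (v : Array (Int × Int)) (p pi x : Int) (hv : INV v) (hx : -1 ≤ x) :
    INV (vset v p pi x) := by
  intro q rho
  rcases vget_vset_cases v p pi x q rho with h | h <;> rw [h]
  · exact hv q rho
  · exact hx

-- ---------- bpush / blevel layer ----------
theorem vget_congr_slot (v : Array (Int × Int)) (p rho pi : Int) (h : (rho = 0) ↔ (pi = 0)) :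
    vget v p rho = vget v p pi := by
  by_cases hr : rho = 0
  · simp [vget, hr, h.mp hr]
  · have hpi : ¬ pi = 0 := fun hp => hr (h.mpr hp)
    simp [vget, hr, hpi]

theorem vget_vset_self' (v : Array (Int × Int)) (p pi rho x : Int)
    (h : (rho = 0) ↔ (pi = 0)) (hsz : pyIdx p < v.size) :
    vget (vset v p pi x) p rho = x := by
  rw [vget_congr_slot _ _ _ _ h]; exact vget_vset_self v p pi x hsz

theorem size_bpush (d : Int) (v : Array (Int × Int)) (nf : List Int) (cands : List Int) :
    (bpush d v nf cands).2.size = v.size := by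
  induction cands generalizing v nf with
  | nil => rfl
  | cons np rest ih =>
    simp only [bpush]; split_ifs with h
    · rw [ih]; exact size_vset v np (d % 2) d
    · exact ih v nf

theorem size_blevel (d : Int) (f : List Int) (v : Array (Int × Int)) (nf : List Int) :
    (blevel d f v nf).2.size = v.size := by
  induction f generalizing v nf with
  | nil => rfl
  | cons p rest ih =>
    simp only [blevel]
    rw [ih]; exact size_bpush d v nf _

theorem INV_bpush (d : Int) (v : Array (Int × Int)) (nf : List Int) (cands : List Int)
    (hv : INV v) (hd : 0 ≤ d) : INV (bpush d v nf cands).2 := by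
  induction cands generalizing v nf with
  | nil => exact hv
  | cons np rest ih =>
    simp only [bpush]; split_ifs with h
    · exact ih _ _ (INV_vset _ _ _ _ hv (by omega))
    · exact ih _ _ hv

theorem INV_blevel (d : Int) (f : List Int) (v : Array (Int × Int)) (nf : List Int)
    (hv : INV v) (hd : 0 ≤ d) : INV (blevel d f v nf).2 := by
  induction f generalizing v nf with
  | nil => exact hv
  | cons p rest ih =>
    simp only [blevel]
    exact ih _ _ (INV_bpush d v nf _ hv hd)

-- pointwise effect of one push / one level on a cell in range
theorem bpush_char (d : Int) (v : Array (Int × Int)) (nf : List Int) (cands : List Int)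
    (q rho : Int) (hq : 0 ≤ q) (hd : 0 ≤ d) (hsz : v.size = 500001) :
    vget (bpush d v nf cands).2 q rho = vget v q rho ∨
      (((rho = 0) ↔ (d % 2 = 0)) ∧ vget v q rho = -1 ∧ vget (bpush d v nf cands).2 q rho = d) := by
  induction cands generalizing v nf with
  | nil => left; rfl
  | cons np rest ih =>
    simp only [bpush]; split_ifs with h
    · obtain ⟨hnp0, hnp1, hnpv⟩ := h
      have hszn : pyIdx np < v.size := by simp only [pyIdx]; omega
      have hsz' : (vset v np (d % 2) d).size = 500001 := by rw [size_vset]; exact hsz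
      by_cases key : q = np ∧ ((rho = 0) ↔ (d % 2 = 0))
      · obtain ⟨hqe, hiff⟩ := key
        subst hqe
        have hvv : vget (vset v q (d % 2) d) q rho = d := vget_vset_self' v q (d % 2) rho d hiff hszn
        have hvold : vget v q rho = -1 := by
          rw [vget_congr_slot _ _ _ _ hiff]; exact hnpv
        rcases ih (vset v q (d % 2) d) (q :: nf) hsz' with h2 | h2
        · exact Or.inr ⟨hiff, hvold, by rw [h2, hvv]⟩
        · exact Or.inr ⟨hiff, hvold, h2.2.2⟩
      · have hne : np ≠ q ∨ ((d % 2 = 0) ↔ ¬(rho = 0)) := by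
          by_cases hqe : q = np
          · right
            have : ¬((rho = 0) ↔ (d % 2 = 0)) := fun hh => key ⟨hqe, hh⟩
            tauto
          · left; exact fun hh => hqe hh.symm
        have hvv : vget (vset v np (d % 2) d) q rho = vget v q rho :=
          vget_vset_ne v np (d % 2) d q rho hnp0 hq hne
        rcases ih (vset v np (d % 2) d) (np :: nf) hsz' with h2 | h2
        · left; rw [h2, hvv]
        · exact Or.inr ⟨h2.1, by rw [← hvv]; exact h2.2.1, h2.2.2⟩
    · exact ih v nf hsz

theorem blevel_char (d : Int) (f : List Int) (v : Array (Int × Int)) (nf : List Int)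
    (q rho : Int) (hq : 0 ≤ q) (hd : 0 ≤ d) (hsz : v.size = 500001) :
    vget (blevel d f v nf).2 q rho = vget v q rho ∨
      (((rho = 0) ↔ (d % 2 = 0)) ∧ vget v q rho = -1 ∧ vget (blevel d f v nf).2 q rho = d) := by
  induction f generalizing v nf with
  | nil => left; rfl
  | cons p rest ih =>
    simp only [blevel]
    have hsz' : (bpush d v nf [p - 1, p + 1, p * 2]).2.size = 500001 := by
      rw [size_bpush]; exact hsz
    rcases ih (bpush d v nf [p - 1, p + 1, p * 2]).2 _ hsz' with h2 | h2
    · rcases bpush_char d v nf [p - 1, p + 1, p * 2] q rho hq hd hsz with h3 | h3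
      · left; rw [h2, h3]
      · exact Or.inr ⟨h3.1, h3.2.1, by rw [h2, h3.2.2]⟩
    · rcases bpush_char d v nf [p - 1, p + 1, p * 2] q rho hq hd hsz with h3 | h3
      · exact Or.inr ⟨h2.1, by rw [← h3]; exact h2.2.1, h2.2.2⟩
      · exact Or.inr ⟨h3.1, h3.2.1, h2.2.2⟩

theorem mono_bpush (d : Int) (v : Array (Int × Int)) (nf : List Int) (cands : List Int)
    (q rho : Int) (hq : 0 ≤ q) (hd : 0 ≤ d) (hsz : v.size = 500001) (h : 0 ≤ vget v q rho) :
    vget (bpush d v nf cands).2 q rho = vget v q rho := by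
  rcases bpush_char d v nf cands q rho hq hd hsz with h2 | h2
  · exact h2
  · omega

theorem mono_blevel (d : Int) (f : List Int) (v : Array (Int × Int)) (nf : List Int)
    (q rho : Int) (hq : 0 ≤ q) (hd : 0 ≤ d) (hsz : v.size = 500001) (h : 0 ≤ vget v q rho) :
    vget (blevel d f v nf).2 q rho = vget v q rho := by
  rcases blevel_char d f v nf q rho hq hd hsz with h2 | h2
  · exact h2
  · omega

-- accumulator is contained in the output frontier
theorem bpush_acc_sub (d : Int) (v : Array (Int × Int)) (nf : List Int) (cands : List Int) :
    ∀ q, q ∈ nf → q ∈ (bpush d v nf cands).1 := by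
  induction cands generalizing v nf with
  | nil => intro q hq; exact hq
  | cons np rest ih =>
    intro q hq
    simp only [bpush]; split_ifs with h
    · exact ih _ _ q (List.mem_cons_of_mem np hq)
    · exact ih _ _ q hq

theorem blevel_acc_sub (d : Int) (f : List Int) (v : Array (Int × Int)) (nf : List Int) :
    ∀ q, q ∈ nf → q ∈ (blevel d f v nf).1 := by
  induction f generalizing v nf with
  | nil => intro q hq; simpa [blevel] using hq
  | cons p rest ih =>
    intro q hq
    simp only [blevel]
    exact ih _ _ q (bpush_acc_sub d v nf _ q hq)

-- a cell changed by the level was appended to the new frontier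
theorem bpush_new_mem (d : Int) (v : Array (Int × Int)) (nf : List Int) (cands : List Int)
    (q rho : Int) (hq : 0 ≤ q)
    (h : vget (bpush d v nf cands).2 q rho ≠ vget v q rho) :
    q ∈ (bpush d v nf cands).1 := by
  induction cands generalizing v nf with
  | nil => exact absurd rfl h
  | cons np rest ih =>
    by_cases hcond : 0 ≤ np ∧ np ≤ 500000 ∧ vget v np (d % 2) = -1
    · simp only [bpush, if_pos hcond] at h ⊢
      by_cases hvv : vget (vset v np (d % 2) d) q rho = vget v q rho
      · rw [← hvv] at h
        exact ih _ _ h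
      · have hqe : q = np := by
          by_contra hne
          exact hvv (vget_vset_ne v np (d % 2) d q rho hcond.1 hq (Or.inl fun hh => hne hh.symm))
        subst hqe
        exact bpush_acc_sub d _ _ rest q (List.mem_cons_self)
    · simp only [bpush, if_neg hcond] at h ⊢
      exact ih _ _ h

theorem blevel_new_mem (d : Int) (f : List Int) (v : Array (Int × Int)) (nf : List Int)
    (q rho : Int) (hq : 0 ≤ q)
    (h : vget (blevel d f v nf).2 q rho ≠ vget v q rho) :
    q ∈ (blevel d f v nf).1 := by
  induction f generalizing v nf with
  | nil => exact absurd rfl h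
  | cons p rest ih =>
    simp only [blevel] at h ⊢
    by_cases hvv : vget (bpush d v nf [p - 1, p + 1, p * 2]).2 q rho = vget v q rho
    · rw [← hvv] at h
      exact ih _ _ h
    · exact blevel_acc_sub d rest _ _ q (bpush_new_mem d v nf _ q rho hq hvv)

-- every in-range neighbour of a frontier member is visited after the level
theorem bpush_covers (d : Int) (v : Array (Int × Int)) (nf : List Int) (cands : List Int)
    (y : Int) (hy : y ∈ cands) (hy0 : 0 ≤ y) (hy1 : y ≤ 500000)
    (hv : INV v) (hd : 0 ≤ d) (hsz : v.size = 500001) :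
    0 ≤ vget (bpush d v nf cands).2 y (d % 2) := by
  induction cands generalizing v nf with
  | nil => cases hy
  | cons np rest ih =>
    rcases List.mem_cons.mp hy with hye | hyr
    · subst hye
      by_cases hcond : 0 ≤ y ∧ y ≤ 500000 ∧ vget v y (d % 2) = -1
      · simp only [bpush, if_pos hcond]
        have hszy : pyIdx y < v.size := by simp only [pyIdx]; omega
        have hset : vget (vset v y (d % 2) d) y (d % 2) = d :=
          vget_vset_self' v y (d % 2) (d % 2) d Iff.rfl hszy
        rw [mono_bpush d _ _ rest y (d % 2) hy0 hd (by rw [size_vset]; exact hsz) (by omega)]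
        omega
      · simp only [bpush, if_neg hcond]
        have hge : 0 ≤ vget v y (d % 2) := by
          have := hv y (d % 2)
          rcases em (vget v y (d % 2) = -1) with he | he
          · exact absurd ⟨hy0, hy1, he⟩ hcond
          · omega
        rw [mono_bpush d v nf rest y (d % 2) hy0 hd hsz hge]
        exact hge
    · by_cases hcond : 0 ≤ np ∧ np ≤ 500000 ∧ vget v np (d % 2) = -1
      · simp only [bpush, if_pos hcond]
        exact ih _ _ hyr (INV_vset _ _ _ _ hv (by omega)) (by rw [size_vset]; exact hsz)
      · simp only [bpush, if_neg hcond]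
        exact ih v nf hyr hv hsz

theorem blevel_covers (d : Int) (f : List Int) (v : Array (Int × Int)) (nf : List Int)
    (x y : Int) (hx : x ∈ f) (hy : y ∈ [x - 1, x + 1, x * 2]) (hy0 : 0 ≤ y) (hy1 : y ≤ 500000)
    (hv : INV v) (hd : 0 ≤ d) (hsz : v.size = 500001) :
    0 ≤ vget (blevel d f v nf).2 y (d % 2) := by
  induction f generalizing v nf with
  | nil => cases hx
  | cons p rest ih =>
    rcases List.mem_cons.mp hx with hxe | hxr
    · subst hxe
      simp only [blevel]
      have h1 : 0 ≤ vget (bpush d v nf [x - 1, x + 1, x * 2]).2 y (d % 2) :=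
        bpush_covers d v nf _ y hy hy0 hy1 hv hd hsz
      rw [mono_blevel d rest _ _ y (d % 2) hy0 hd (by rw [size_bpush]; exact hsz) h1]
      exact h1
    · simp only [blevel]
      exact ih _ _ hxr (INV_bpush d v nf _ hv hd) (by rw [size_bpush]; exact hsz)

-- a cell changed by the level comes from some frontier member's move list
theorem bpush_src (d : Int) (v : Array (Int × Int)) (nf : List Int) (cands : List Int)
    (q rho : Int) (hq : 0 ≤ q)
    (h : vget (bpush d v nf cands).2 q rho ≠ vget v q rho) : q ∈ cands := by
  induction cands generalizing v nf with
  | nil => exact absurd rfl h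
  | cons np rest ih =>
    by_cases hcond : 0 ≤ np ∧ np ≤ 500000 ∧ vget v np (d % 2) = -1
    · simp only [bpush, if_pos hcond] at h
      by_cases hvv : vget (vset v np (d % 2) d) q rho = vget v q rho
      · rw [← hvv] at h
        exact List.mem_cons_of_mem np (ih _ _ h)
      · have hqe : q = np := by
          by_contra hne
          exact hvv (vget_vset_ne v np (d % 2) d q rho hcond.1 hq (Or.inl fun hh => hne hh.symm))
        subst hqe; exact List.mem_cons_self
    · simp only [bpush, if_neg hcond] at h
      exact List.mem_cons_of_mem np (ih _ _ h)

theorem blevel_src (d : Int) (f : List Int) (v : Array (Int × Int)) (nf : List Int)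
    (q rho : Int) (hq : 0 ≤ q)
    (h : vget (blevel d f v nf).2 q rho ≠ vget v q rho) :
    ∃ p ∈ f, q ∈ [p - 1, p + 1, p * 2] := by
  induction f generalizing v nf with
  | nil => exact absurd rfl h
  | cons p rest ih =>
    simp only [blevel] at h
    by_cases hvv : vget (bpush d v nf [p - 1, p + 1, p * 2]).2 q rho = vget v q rho
    · rw [← hvv] at h
      obtain ⟨p', hp', hm⟩ := ih _ _ h
      exact ⟨p', List.mem_cons_of_mem p hp', hm⟩
    · exact ⟨p, List.mem_cons_self, bpush_src d v nf _ q rho hq hvv⟩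

-- every frontier output element is in range and visited at the level's slot
theorem bpush_out (d : Int) (v : Array (Int × Int)) (nf : List Int) (cands : List Int)
    (hv : INV v) (hd : 0 ≤ d) (hsz : v.size = 500001)
    (hnf : ∀ x ∈ nf, 0 ≤ x ∧ x ≤ 500000 ∧ 0 ≤ vget v x (d % 2)) :
    ∀ q ∈ (bpush d v nf cands).1,
      0 ≤ q ∧ q ≤ 500000 ∧ 0 ≤ vget (bpush d v nf cands).2 q (d % 2) := by
  induction cands generalizing v nf with
  | nil =>
    intro q hq
    exact hnf q hq
  | cons np rest ih =>
    intro q hq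
    by_cases hcond : 0 ≤ np ∧ np ≤ 500000 ∧ vget v np (d % 2) = -1
    · simp only [bpush, if_pos hcond] at hq ⊢
      refine ih _ _ (INV_vset _ _ _ _ hv (by omega)) (by rw [size_vset]; exact hsz) ?_ q hq
      intro x hx
      rcases List.mem_cons.mp hx with hxe | hxr
      · subst hxe
        have hszn : pyIdx x < v.size := by simp only [pyIdx]; omega
        refine ⟨hcond.1, hcond.2.1, ?_⟩
        rw [vget_vset_self' v x (d % 2) (d % 2) d Iff.rfl hszn]
        omega
      · obtain ⟨h1, h2, h3⟩ := hnf x hxr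
        refine ⟨h1, h2, ?_⟩
        rcases vget_vset_cases v np (d % 2) d x (d % 2) with hc | hc <;> rw [hc] <;> omega
    · simp only [bpush, if_neg hcond] at hq ⊢
      exact ih _ _ hv hsz hnf q hq

theorem blevel_out (d : Int) (f : List Int) (v : Array (Int × Int)) (nf : List Int)
    (hv : INV v) (hd : 0 ≤ d) (hsz : v.size = 500001)
    (hnf : ∀ x ∈ nf, 0 ≤ x ∧ x ≤ 500000 ∧ 0 ≤ vget v x (d % 2)) :
    ∀ q ∈ (blevel d f v nf).1,
      0 ≤ q ∧ q ≤ 500000 ∧ 0 ≤ vget (blevel d f v nf).2 q (d % 2) := by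
  induction f generalizing v nf with
  | nil =>
    intro q hq
    simp only [blevel, List.mem_reverse] at hq
    exact hnf q hq
  | cons p rest ih =>
    intro q hq
    simp only [blevel] at hq ⊢
    refine ih _ _ (INV_bpush d v nf _ hv hd) (by rw [size_bpush]; exact hsz) ?_ q hq
    exact bpush_out d v nf _ hv hd hsz hnf

-- ---------- global (st-level) invariants ----------
theorem st_zero (s : Int) : st s 0 = (0, [s], initV s) := rfl

theorem st_succ (s : Int) (k : Nat) : st s (k + 1) = stepB (st s k) := rfl

theorem stepB_nil (d : Int) (v : Array (Int × Int)) : stepB (d, [], v) = (d, [], v) := rfl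

theorem stepB_cons (d : Int) (p : Int) (rest : List Int) (v : Array (Int × Int)) :
    stepB (d, p :: rest, v) =
      (d + 1, (blevel (d + 1) (p :: rest) v []).1, (blevel (d + 1) (p :: rest) v []).2) := rfl

theorem Wd_zero (s : Int) : Wd s 0 = initV s := by rw [Wd, st_zero]

theorem Fr_zero (s : Int) : Fr s 0 = [s] := by rw [Fr, st_zero]

theorem vget_init_ne (s p rho : Int) (hs : 0 ≤ s) (hp : 0 ≤ p)
    (h : p ≠ s ∨ rho ≠ 0) : vget (initV s) p rho = -1 := by
  have hrep : ∀ (q pi : Int), vget (Array.replicate 500001 ((-1 : Int), (-1 : Int))) q pi = -1 := by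
    intro q pi
    simp only [vget, Array.getD_eq_getD_getElem?, Array.getElem?_replicate]
    split_ifs <;> simp
  have hne : s ≠ p ∨ ((0 : Int) = 0 ↔ ¬(rho = 0)) := by
    rcases h with h | h
    · exact Or.inl fun hh => h hh.symm
    · exact Or.inr (by simp [h])
  rw [initV, vget_vset_ne _ _ _ _ _ _ hs hp hne]
  exact hrep p rho

theorem vget_init_self (s : Int) (hs : 0 ≤ s) (hs1 : s ≤ 500000) : vget (initV s) s 0 = 0 := by
  apply vget_vset_self
  simp only [Array.size_replicate, pyIdx]
  omega

theorem size_Wd (s : Int) (k : Nat) : (Wd s k).size = 500001 := by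
  induction k with
  | zero =>
    rw [Wd_zero, initV, size_vset, Array.size_replicate]
  | succ k ih =>
    rw [Wd, st_succ]
    rcases hst : st s k with ⟨d, f, v⟩
    have hv : v.size = 500001 := by rw [← ih]; simp [Wd, hst]
    cases f with
    | nil => rw [stepB_nil]; exact hv
    | cons p rest => rw [stepB_cons]; rw [size_blevel]; exact hv

theorem Fr_freeze (s : Int) (k j : Nat) (h : Fr s k = []) : st s (k + j) = st s k := by
  induction j with
  | zero => rfl
  | succ j ih =>
    have hstep : st s (k + (j + 1)) = stepB (st s (k + j)) := by
      have : k + (j + 1) = (k + j) + 1 := by omega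
      rw [this, st_succ]
    rw [hstep, ih]
    rcases hst : st s k with ⟨d, f, v⟩
    have hf : f = [] := by rwa [Fr, hst] at h
    subst hf
    rw [stepB_nil]

theorem d_of_st (s : Int) (k : Nat) (h : Fr s k ≠ []) : (st s k).1 = (k : Int) := by
  induction k with
  | zero => rw [st_zero]; rfl
  | succ k ih =>
    rcases hst : st s k with ⟨d, f, v⟩
    cases f with
    | nil =>
      exfalso
      have : st s (k + 1) = st s k := Fr_freeze s k 1 (by rw [Fr, hst])
      apply h
      rw [Fr, this, hst]
    | cons p rest =>
      have hd : d = (k : Int) := by have := ih (by rw [Fr, hst]; simp); rwa [hst] at this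
      rw [st_succ, hst, stepB_cons, hd]
      push_cast
      ring

theorem INV_Wd (s : Int) (k : Nat) : INV (Wd s k) := by
  induction k with
  | zero =>
    intro p rho
    rcases vget_vset_cases (Array.replicate 500001 ((-1 : Int), (-1 : Int))) s 0 0 p rho with h | h <;>
      rw [Wd_zero, initV, h]
    · simp only [vget, Array.getD_eq_getD_getElem?, Array.getElem?_replicate]
      split_ifs <;> simp
    · omega
  | succ k ih =>
    rw [Wd, st_succ]
    rcases hst : st s k with ⟨d, f, v⟩
    have hv : INV v := by have := ih; rwa [Wd, hst] at this
    cases f with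
    | nil => rw [stepB_nil]; exact hv
    | cons p rest =>
      have hd : d = (k : Int) := by
        have := d_of_st s k (by rw [Fr, hst]; simp); rwa [hst] at this
      rw [stepB_cons]
      exact INV_blevel _ _ _ _ hv (by omega)

theorem W0_char (s : Int) (hs : 0 ≤ s) (hs1 : s ≤ 500000) (p rho : Int) (hp : 0 ≤ p) :
    vget (Wd s 0) p rho = if p = s ∧ rho = 0 then 0 else -1 := by
  rw [Wd_zero]
  by_cases h : p = s ∧ rho = 0
  · rw [if_pos h, h.1, h.2]
    exact vget_init_self s hs hs1
  · rw [if_neg h]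
    apply vget_init_ne s p rho hs hp
    tauto

theorem Wd_step_char (s : Int) (k : Nat) (p rho : Int) (hp : 0 ≤ p) :
    vget (Wd s (k + 1)) p rho = vget (Wd s k) p rho ∨
      (vget (Wd s k) p rho = -1 ∧ vget (Wd s (k + 1)) p rho = (k : Int) + 1 ∧
        ((rho = 0) ↔ (((k : Int) + 1) % 2 = 0)) ∧ p ∈ Fr s (k + 1)) := by
  rcases hst : st s k with ⟨d, f, v⟩
  cases f with
  | nil =>
    left
    have : st s (k + 1) = st s k := Fr_freeze s k 1 (by rw [Fr, hst])
    rw [Wd, Wd, this]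
  | cons p0 rest =>
    have hd : d = (k : Int) := by
      have := d_of_st s k (by rw [Fr, hst]; simp); rwa [hst] at this
    subst hd
    have hW1 : Wd s (k + 1) = (blevel ((k : Int) + 1) (p0 :: rest) v []).2 := by
      rw [Wd, st_succ, hst, stepB_cons]
    have hF1 : Fr s (k + 1) = (blevel ((k : Int) + 1) (p0 :: rest) v []).1 := by
      rw [Fr, st_succ, hst, stepB_cons]
    have hWk : Wd s k = v := by rw [Wd, hst]
    have hsz : v.size = 500001 := by rw [← hWk]; exact size_Wd s k
    rcases blevel_char ((k : Int) + 1) (p0 :: rest) v [] p rho hp (by omega) hsz with h | h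
    · left; rw [hW1, hWk]; exact h
    · right
      refine ⟨by rw [hWk]; exact h.2.1, by rw [hW1]; exact h.2.2, h.1, ?_⟩
      rw [hF1]
      apply blevel_new_mem _ _ _ _ _ _ hp
      rw [h.2.1, h.2.2]
      omega

theorem Wd_mono (s : Int) (j k : Nat) (hjk : j ≤ k) (p rho : Int) (hp : 0 ≤ p)
    (h : 0 ≤ vget (Wd s j) p rho) : vget (Wd s k) p rho = vget (Wd s j) p rho := by
  obtain ⟨m, rfl⟩ := Nat.exists_eq_add_of_le hjk
  induction m with
  | zero => rfl
  | succ m ih =>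
    have : j + (m + 1) = (j + m) + 1 := by omega
    rw [this]
    rcases Wd_step_char s (j + m) p rho hp with h2 | h2
    · rw [h2]; exact ih (by omega)
    · rw [ih (by omega)] at h2; omega

-- members of the frontier are in range and visited at their level's slot
theorem frontier_visited (s : Int) (hs : 0 ≤ s) (hs1 : s ≤ 500000) (k : Nat) :
    ∀ p ∈ Fr s k, 0 ≤ p ∧ p ≤ 500000 ∧ 0 ≤ vget (Wd s k) p ((k : Int) % 2) := by
  induction k with
  | zero =>
    intro p hp
    rw [Fr_zero] at hp
    simp only [List.mem_singleton] at hp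
    rw [hp, Wd_zero]
    refine ⟨hs, hs1, ?_⟩
    have := vget_init_self s hs hs1
    have he : ((0 : Nat) : Int) % 2 = 0 := by norm_num
    rw [he, this]
  | succ k ih =>
    intro p hp
    rcases hst : st s k with ⟨d, f, v⟩
    cases f with
    | nil =>
      exfalso
      have hfr : Fr s k = [] := by rw [Fr, hst]
      have : st s (k + 1) = st s k := Fr_freeze s k 1 hfr
      rw [Fr, this, hst] at hp
      exact absurd hp List.not_mem_nil
    | cons p0 rest =>
      have hd : d = (k : Int) := by
        have := d_of_st s k (by rw [Fr, hst]; simp); rwa [hst] at this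
      subst hd
      have hW1 : Wd s (k + 1) = (blevel ((k : Int) + 1) (p0 :: rest) v []).2 := by
        rw [Wd, st_succ, hst, stepB_cons]
      have hF1 : Fr s (k + 1) = (blevel ((k : Int) + 1) (p0 :: rest) v []).1 := by
        rw [Fr, st_succ, hst, stepB_cons]
      have hWk : Wd s k = v := by rw [Wd, hst]
      have hsz : v.size = 500001 := by rw [← hWk]; exact size_Wd s k
      have hIV : INV v := by rw [← hWk]; exact INV_Wd s k
      rw [hF1] at hp
      have hout := blevel_out ((k : Int) + 1) (p0 :: rest) v [] hIV (by omega) hsz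
        (by intro x hx; exact absurd hx List.not_mem_nil) p hp
      have hcast : ((k + 1 : Nat) : Int) % 2 = ((k : Int) + 1) % 2 := by push_cast; ring_nf
      rw [hW1, hcast]
      exact hout

-- ---------- completeness (empty frontier ⇒ everything is visited) ----------
def CLO (s : Int) (k : Nat) : Prop :=
  ∀ p rho : Int, 0 ≤ p → p ≤ 500000 → (rho = 0 ∨ rho = 1) → 0 ≤ vget (Wd s k) p rho →
    (rho = (k : Int) % 2 ∧ p ∈ Fr s k) ∨
      ∀ q ∈ [p - 1, p + 1, p * 2], 0 ≤ q → q ≤ 500000 → 0 ≤ vget (Wd s k) q (1 - rho)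

theorem CLO_all (s : Int) (hs : 0 ≤ s) (hs1 : s ≤ 500000) (k : Nat) : CLO s k := by
  induction k with
  | zero =>
    intro p rho hp hp1 hrho hvis
    rw [W0_char s hs hs1 p rho hp] at hvis
    split_ifs at hvis with hc
    · left
      rw [Fr_zero]
      exact ⟨by rw [hc.2]; simp, by simp [hc.1]⟩
    · omega
  | succ k ih =>
    intro p rho hp hp1 hrho hvis
    rcases hst : st s k with ⟨d, f, v⟩
    cases f with
    | nil =>
      have hfreeze : st s (k + 1) = st s k := Fr_freeze s k 1 (by rw [Fr, hst])
      have hW : Wd s (k + 1) = Wd s k := by rw [Wd, Wd, hfreeze]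
      rw [hW] at hvis
      rcases ih p rho hp hp1 hrho hvis with hmem | hclo
      · exfalso; rw [Fr, hst] at hmem; exact absurd hmem.2 (List.not_mem_nil)
      · right; intro q hq hq0 hq1; rw [hW]; exact hclo q hq hq0 hq1
    | cons p0 rest =>
      have hd : d = (k : Int) := by
        have := d_of_st s k (by rw [Fr, hst]; simp); rwa [hst] at this
      subst hd
      have hW1 : Wd s (k + 1) = (blevel ((k : Int) + 1) (p0 :: rest) v []).2 := by
        rw [Wd, st_succ, hst, stepB_cons]
      have hF1 : Fr s (k + 1) = (blevel ((k : Int) + 1) (p0 :: rest) v []).1 := by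
        rw [Fr, st_succ, hst, stepB_cons]
      have hWk : Wd s k = v := by rw [Wd, hst]
      have hsz : v.size = 500001 := by rw [← hWk]; exact size_Wd s k
      have hIV : INV v := by rw [← hWk]; exact INV_Wd s k
      by_cases hnew : vget (Wd s k) p rho = -1
      · left
        have hne : vget (Wd s (k + 1)) p rho ≠ vget (Wd s k) p rho := by omega
        constructor
        · rcases blevel_char ((k : Int) + 1) (p0 :: rest) v [] p rho hp (by omega) hsz with h | h
          · exfalso; apply hne; rw [hW1, hWk]; exact h
          · rcases hrho with hr | hr <;> subst hr
            · have := h.1.mp rfl; push_cast; omega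
            · have : ¬(((k : Int) + 1) % 2 = 0) := fun hh => by have := h.1.mpr hh; omega
              push_cast; omega
        · rw [hF1]
          apply blevel_new_mem _ _ _ _ _ _ hp
          rw [← hW1, ← hWk]
          exact hne
      · have hvisk : 0 ≤ vget (Wd s k) p rho := by have := INV_Wd s k p rho; omega
        rcases ih p rho hp hp1 hrho hvisk with hmem | hclo
        · right
          intro q hq hq0 hq1
          have hslot : 1 - rho = ((k : Int) + 1) % 2 := by
            have h1 : rho = (k : Int) % 2 := hmem.1
            omega
          have hx : p ∈ p0 :: rest := by have := hmem.2; rwa [Fr, hst] at this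
          rw [hW1, hslot]
          exact blevel_covers ((k : Int) + 1) (p0 :: rest) v [] p q hx hq hq0 hq1 hIV (by omega) hsz
        · right
          intro q hq hq0 hq1
          have hq2 := hclo q hq hq0 hq1
          rw [Wd_mono s k (k + 1) (by omega) q (1 - rho) hq0 hq2]
          exact hq2

inductive Reach (s : Int) : Int → Int → Prop
  | base : Reach s s 0
  | step {p pi q : Int} : Reach s p pi → (q = p - 1 ∨ q = p + 1 ∨ q = p * 2) →
      0 ≤ q → q ≤ 500000 → Reach s q (1 - pi)

theorem reach_in_range (s p pi : Int) (hs : 0 ≤ s) (hs1 : s ≤ 500000) (h : Reach s p pi) :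
    0 ≤ p ∧ p ≤ 500000 ∧ (pi = 0 ∨ pi = 1) := by
  induction h with
  | base => exact ⟨hs, hs1, Or.inl rfl⟩
  | step h hqe hq0 hq1 ih =>
    refine ⟨hq0, hq1, ?_⟩
    rcases ih.2.2 with hh | hh <;> [right; left] <;> omega

theorem reach_desc (s : Int) (hs : 0 ≤ s) (hs1 : s ≤ 500000) :
    ∀ n : Nat, (n : Int) ≤ s → Reach s (s - (n : Int)) ((n : Int) % 2) := by
  intro n
  induction n with
  | zero => intro _; simpa using Reach.base (s := s)
  | succ n ih =>
    intro hn
    have hn' : (n : Int) ≤ s := by push_cast at hn; omega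
    have h2 : Reach s (s - (n : Int) - 1) (1 - (n : Int) % 2) :=
      Reach.step (ih hn') (Or.inl rfl) (by push_cast at hn; omega) (by omega)
    have e1 : s - ((n + 1 : Nat) : Int) = s - (n : Int) - 1 := by push_cast; ring
    have e2 : ((n + 1 : Nat) : Int) % 2 = 1 - (n : Int) % 2 := by push_cast; omega
    rw [e1, e2]
    exact h2

theorem reach_flip (s pi : Int) (h : Reach s 0 pi) : Reach s 0 (1 - pi) :=
  Reach.step (q := 0) h (Or.inr (Or.inr (by norm_num))) (by norm_num) (by norm_num)

theorem reach_zero_both (s : Int) (hs : 0 ≤ s) (hs1 : s ≤ 500000) :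
    Reach s 0 0 ∧ Reach s 0 1 := by
  have h0 := reach_desc s hs hs1 s.toNat (by omega)
  have e : s - (s.toNat : Int) = 0 := by omega
  rw [e] at h0
  have hm : (s.toNat : Int) % 2 = 0 ∨ (s.toNat : Int) % 2 = 1 := by omega
  rcases hm with hm | hm <;> rw [hm] at h0
  · exact ⟨h0, by simpa using reach_flip s 0 h0⟩
  · exact ⟨by simpa using reach_flip s 1 h0, h0⟩

theorem reach_up (s : Int) (hs : 0 ≤ s) (hs1 : s ≤ 500000) :
    ∀ n : Nat, (n : Int) ≤ 500000 → Reach s (n : Int) 0 ∧ Reach s (n : Int) 1 := by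
  intro n
  induction n with
  | zero => intro _; simpa using reach_zero_both s hs hs1
  | succ n ih =>
    intro hn
    have hn' : (n : Int) ≤ 500000 := by push_cast at hn; omega
    obtain ⟨r0, r1⟩ := ih hn'
    have s0 : Reach s ((n : Int) + 1) (1 - 0) :=
      Reach.step r0 (Or.inr (Or.inl rfl)) (by omega) (by push_cast at hn; omega)
    have s1 : Reach s ((n : Int) + 1) (1 - 1) :=
      Reach.step r1 (Or.inr (Or.inl rfl)) (by omega) (by push_cast at hn; omega)
    constructor
    · have e : ((n + 1 : Nat) : Int) = (n : Int) + 1 := by push_cast; ring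
      rw [e]; simpa using s1
    · have e : ((n + 1 : Nat) : Int) = (n : Int) + 1 := by push_cast; ring
      rw [e]; simpa using s0

theorem reach_all (s : Int) (hs : 0 ≤ s) (hs1 : s ≤ 500000) (p rho : Int)
    (hp : 0 ≤ p) (hp1 : p ≤ 500000) (hrho : rho = 0 ∨ rho = 1) : Reach s p rho := by
  have h := reach_up s hs hs1 p.toNat (by omega)
  have e : (p.toNat : Int) = p := by omega
  rw [e] at h
  rcases hrho with hr | hr <;> subst hr
  · exact h.1
  · exact h.2

theorem visited_of_reach (s : Int) (hs : 0 ≤ s) (hs1 : s ≤ 500000) (k : Nat)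
    (hk : Fr s k = []) (p rho : Int) (h : Reach s p rho) : 0 ≤ vget (Wd s k) p rho := by
  induction h with
  | base =>
    have h0 : vget (Wd s 0) s 0 = 0 := by rw [W0_char s hs hs1 s 0 hs]; simp
    rw [Wd_mono s 0 k (Nat.zero_le k) s 0 hs (by omega)]
    omega
  | @step p' pi' q' h hqe hq0 hq1 ih =>
    have hr := reach_in_range s p' pi' hs hs1 h
    rcases CLO_all s hs hs1 k p' pi' hr.1 hr.2.1 hr.2.2 ih with hmem | hclo
    · exfalso; rw [hk] at hmem; exact absurd hmem.2 (List.not_mem_nil)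
    · exact hclo q' (by rcases hqe with hh | hh | hh <;> subst hh <;> simp) hq0 hq1

theorem complete_of_empty (s : Int) (hs : 0 ≤ s) (hs1 : s ≤ 500000) (k : Nat)
    (hk : Fr s k = []) (p rho : Int) (hp : 0 ≤ p) (hp1 : p ≤ 500000)
    (hrho : rho = 0 ∨ rho = 1) : 0 ≤ vget (Wd s k) p rho := by
  exact visited_of_reach s hs hs1 k hk p rho (reach_all s hs hs1 p rho hp hp1 hrho)

-- ---------- arithmetic ----------
theorem tri_mono (a b : Int) (ha : 0 ≤ a) (hab : a ≤ b) : a * (a + 1) / 2 ≤ b * (b + 1) / 2 := by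
  have h1 : a * (a + 1) ≤ b * (b + 1) := by nlinarith
  exact Int.ediv_le_ediv (by norm_num) h1

theorem tri_step (t : Int) : t * (t + 1) / 2 + (t + 1) = (t + 1) * (t + 2) / 2 := by
  obtain ⟨m, hm⟩ : Even (t * (t + 1)) := Int.even_mul_succ_self t
  have h2 : (t + 1) * (t + 2) = (m + t + 1) + (m + t + 1) := by nlinarith
  omega

-- ---------- the step characterisation of the visited sets ----------
-- position q is visited (slot (t+1)%2) at time t+1 iff it is an in-range move of a
-- position visited (slot t%2) at time t
theorem Vstep (s : Int) (hs : 0 ≤ s) (hs1 : s ≤ 500000) (t : Nat) (q : Int)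
    (hq : 0 ≤ q) (hq1 : q ≤ 500000) :
    0 ≤ vget (Wd s (t + 1)) q (((t : Int) + 1) % 2) ↔
      ∃ p : Int, 0 ≤ p ∧ p ≤ 500000 ∧ 0 ≤ vget (Wd s t) p ((t : Int) % 2) ∧
        (q = p - 1 ∨ q = p + 1 ∨ q = p * 2) := by
  have hslot : 1 - (((t : Int) + 1) % 2) = (t : Int) % 2 := by omega
  constructor
  · intro hvis
    by_cases hsame : vget (Wd s (t + 1)) q (((t : Int) + 1) % 2)
        = vget (Wd s t) q (((t : Int) + 1) % 2)
    · rw [hsame] at hvis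
      have hrho : ((t : Int) + 1) % 2 = 0 ∨ ((t : Int) + 1) % 2 = 1 := by omega
      rcases CLO_all s hs hs1 t q (((t : Int) + 1) % 2) hq hq1 hrho hvis with hmem | hclo
      · exfalso; have := hmem.1; omega
      · by_cases hq0 : q = 0
        · have h0 := hclo (q * 2) (by simp) (by omega) (by omega)
          rw [hslot] at h0
          exact ⟨q * 2, by omega, by omega, h0, Or.inr (Or.inr (by omega))⟩
        · have h0 := hclo (q - 1) (by simp) (by omega) (by omega)
          rw [hslot] at h0
          exact ⟨q - 1, by omega, by omega, h0, Or.inr (Or.inl (by ring))⟩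
    · rcases hst : st s t with ⟨d, f, v⟩
      cases f with
      | nil =>
        exfalso
        have hfr : st s (t + 1) = st s t := Fr_freeze s t 1 (by rw [Fr, hst])
        exact hsame (by rw [Wd, Wd, hfr])
      | cons p0 rest =>
        have hd : d = (t : Int) := by
          have := d_of_st s t (by rw [Fr, hst]; simp); rwa [hst] at this
        subst hd
        have hW1 : Wd s (t + 1) = (blevel ((t : Int) + 1) (p0 :: rest) v []).2 := by
          rw [Wd, st_succ, hst, stepB_cons]
        have hWk : Wd s t = v := by rw [Wd, hst]
        have hchg : vget (blevel ((t : Int) + 1) (p0 :: rest) v []).2 q (((t : Int) + 1) % 2)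
            ≠ vget v q (((t : Int) + 1) % 2) := by
          rw [← hW1, ← hWk]; exact hsame
        obtain ⟨p, hpf, hpm⟩ := blevel_src ((t : Int) + 1) (p0 :: rest) v [] q _ hq hchg
        have hpF : p ∈ Fr s t := by rw [Fr, hst]; exact hpf
        obtain ⟨hp0, hp1, hpv⟩ := frontier_visited s hs hs1 t p hpF
        simp only [List.mem_cons, List.not_mem_nil, or_false] at hpm
        exact ⟨p, hp0, hp1, hpv, hpm⟩
  · rintro ⟨p, hp0, hp1, hpv, hmv⟩
    have hrho : (t : Int) % 2 = 0 ∨ (t : Int) % 2 = 1 := by omega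
    rcases CLO_all s hs hs1 t p ((t : Int) % 2) hp0 hp1 hrho hpv with hmem | hclo
    · rcases hst : st s t with ⟨d, f, v⟩
      have hpF : p ∈ f := by have := hmem.2; rwa [Fr, hst] at this
      cases f with
      | nil => exact absurd hpF List.not_mem_nil
      | cons p0 rest =>
        have hd : d = (t : Int) := by
          have := d_of_st s t (by rw [Fr, hst]; simp); rwa [hst] at this
        subst hd
        have hW1 : Wd s (t + 1) = (blevel ((t : Int) + 1) (p0 :: rest) v []).2 := by
          rw [Wd, st_succ, hst, stepB_cons]
        have hWk : Wd s t = v := by rw [Wd, hst]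
        have hsz : v.size = 500001 := by rw [← hWk]; exact size_Wd s t
        have hIV : INV v := by rw [← hWk]; exact INV_Wd s t
        rw [hW1]
        exact blevel_covers ((t : Int) + 1) (p0 :: rest) v [] p q hpF
          (by rcases hmv with h | h | h <;> simp [h]) hq hq1 hIV (by omega) hsz
    · have h0 := hclo q (by rcases hmv with h | h | h <;> simp [h]) hq hq1
      have h1 : 0 ≤ vget (Wd s t) q (((t : Int) + 1) % 2) := by
        rw [show ((t : Int) + 1) % 2 = 1 - (t : Int) % 2 by omega]
        exact h0
      rw [Wd_mono s t (t + 1) (by omega) q _ hq h1]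
      exact h1

-- ---------- bit-level lemmas ----------
theorem land_one_iff (x n : Nat) : ((x >>> n) &&& 1 = 1) ↔ x.testBit n = true := by
  rw [Nat.and_one_is_mod, Nat.shiftRight_eq_div_pow, Nat.testBit_eq_decide_div_mod_eq]
  simp

theorem testBit_log2_self (n : Nat) (h : n ≠ 0) : n.testBit n.log2 = true := by
  have h1 : 2 ^ n.log2 ≤ n := Nat.log2_self_le h
  have h2 : n < 2 ^ (n.log2 + 1) := Nat.lt_log2_self
  rw [Nat.testBit_eq_decide_div_mod_eq]
  have hd : n / 2 ^ n.log2 = 1 := by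
    apply Nat.div_eq_of_lt_le
    · simpa using h1
    · rw [pow_succ] at h2; omega
  simp [hd]

theorem testBit_sub_top (n : Nat) (h : n ≠ 0) (q : Nat) :
    (n - 1 <<< n.log2).testBit q = (n.testBit q && !(q == n.log2)) := by
  set p := n.log2 with hp
  have h1 : 2 ^ p ≤ n := Nat.log2_self_le h
  have h2 : n < 2 ^ (p + 1) := Nat.lt_log2_self
  rw [Nat.one_shiftLeft]
  set m := n - 2 ^ p with hm
  have hmn : n = 2 ^ p + m := by omega
  have hmlt : m < 2 ^ p := by rw [pow_succ] at h2; omega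
  rcases lt_trichotomy q p with hq | hq | hq
  · -- low bits unchanged
    have key : ∀ x : Nat, x < 2 ^ p → (2 ^ p + x).testBit q = x.testBit q := by
      intro x hx
      rw [Nat.testBit_eq_decide_div_mod_eq, Nat.testBit_eq_decide_div_mod_eq]
      have hpow : 2 ^ p = 2 ^ (p - q) * 2 ^ q := by rw [← pow_add]; congr 1; omega
      have hdiv : (2 ^ p + x) / 2 ^ q = x / 2 ^ q + 2 ^ (p - q) := by
        rw [hpow, Nat.add_comm, Nat.add_mul_div_right _ _ (Nat.two_pow_pos q)]
      have heven : 2 ^ (p - q) = 2 * 2 ^ (p - q - 1) := by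
        rw [← pow_succ']; congr 1; omega
      have hmod : (x / 2 ^ q + 2 ^ (p - q)) % 2 = x / 2 ^ q % 2 := by
        rw [heven]; omega
      rw [hdiv, hmod]
    have := key m hmlt
    rw [← hmn] at this
    rw [this]
    have hne : ¬ (q == p) = true := by simp; omega
    simp [hne]
  · rw [hq]
    have hL : m.testBit p = false := Nat.testBit_lt_two_pow hmlt
    simp [hL]
  · have hL : m.testBit q = false := Nat.testBit_lt_two_pow (lt_of_lt_of_le hmlt (Nat.pow_le_pow_right (by norm_num) (by omega)))
    have hR : n.testBit q = false := Nat.testBit_lt_two_pow (lt_of_lt_of_le h2 (Nat.pow_le_pow_right (by norm_num) (by omega)))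
    simp [hL, hR]

theorem dblLoop_spec (nw d q : Nat) :
    (dblLoop nw d).testBit q = (d.testBit q || (decide (q % 2 = 0) && nw.testBit (q / 2))) := by
  induction nw using Nat.strong_induction_on generalizing d with
  | _ nw ih =>
    rw [dblLoop]
    split
    · next h => subst h; simp [Nat.zero_testBit]
    · next h =>
      have hlt : nw - 1 <<< nw.log2 < nw := by
        simp only [Nat.one_shiftLeft]
        exact Nat.sub_lt (Nat.pos_of_ne_zero h) (Nat.two_pow_pos _)
      rw [ih _ hlt, Nat.testBit_lor, testBit_sub_top nw h, Nat.one_shiftLeft,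
        Nat.testBit_two_pow]
      by_cases hq2 : q % 2 = 0
      · by_cases hqp : q / 2 = nw.log2
        · have hq : 2 * nw.log2 = q := by omega
          simp [hq, hq2, hqp, testBit_log2_self nw h]
        · have hq : ¬ (2 * nw.log2 = q) := by omega
          have hqp' : ¬ (q / 2 == nw.log2) = true := by simp [hqp]
          simp [hq, hq2, hqp']
      · have hq : ¬ (2 * nw.log2 = q) := by omega
        simp [hq, hq2]

-- ---------- the B-side invariants ----------
def CURinv (s : Int) (t : Nat) (cur : Nat) : Prop :=
  ∀ i : Nat, cur.testBit i =
    (decide ((i : Int) ≤ 500000) && decide (0 ≤ vget (Wd s t) (i : Int) ((t : Int) % 2)))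

def SUBinv (s : Int) (t : Nat) (rho : Int) (sn : Nat) : Prop :=
  ∀ i : Nat, sn.testBit i = true → (i : Int) ≤ 250000 ∧ 0 ≤ vget (Wd s t) (i : Int) rho

def EQinv (sn dn : Nat) : Prop :=
  ∀ q : Nat, dn.testBit q = (decide (q % 2 = 0) && sn.testBit (q / 2))

theorem SUBinv_mono (s : Int) (t : Nat) (rho : Int) (sn : Nat)
    (h : SUBinv s t rho sn) : SUBinv s (t + 1) rho sn := by
  intro i hi
  obtain ⟨h1, h2⟩ := h i hi
  refine ⟨h1, ?_⟩
  rw [Wd_mono s t (t + 1) (by omega) (i : Int) rho (by positivity) h2]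
  exact h2

theorem dbl_update (s : Int) (t : Nat) (cur sn dn : Nat)
    (hc : CURinv s t cur) (hsub : SUBinv s t ((t : Int) % 2) sn) (heq : EQinv sn dn) :
    EQinv (cur &&& (1 <<< 250001 - 1)) (dblLoop ((cur &&& (1 <<< 250001 - 1)) ^^^ ((cur &&& (1 <<< 250001 - 1)) &&& sn)) dn) := by
  intro q
  have hsubm : ∀ i : Nat, sn.testBit i = true →
      (cur &&& (1 <<< 250001 - 1)).testBit i = true := by
    intro i hi
    obtain ⟨h1, h2⟩ := hsub i hi
    rw [Nat.testBit_land, Nat.one_shiftLeft, Nat.testBit_two_pow_sub_one, hc i]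
    simp only [Bool.and_eq_true, decide_eq_true_iff]
    exact ⟨⟨by omega, h2⟩, by omega⟩
  have hx : ∀ i : Nat,
      (((cur &&& (1 <<< 250001 - 1)) ^^^ ((cur &&& (1 <<< 250001 - 1)) &&& sn)).testBit i)
        = ((cur &&& (1 <<< 250001 - 1)).testBit i && !(sn.testBit i)) := by
    intro i
    rw [Nat.testBit_xor, Nat.testBit_land (cur &&& (1 <<< 250001 - 1)) sn i]
    rcases hb1 : (cur &&& (1 <<< 250001 - 1)).testBit i <;>
      rcases hb2 : sn.testBit i <;> rfl
  rw [dblLoop_spec, heq q, hx]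
  have key : ∀ (a b c : Bool), (b = true → a = true) →
      (((c && b) || (c && (a && !b))) = (c && a)) := by
    intro a b c h
    cases a <;> cases b <;> cases c <;> simp_all
  exact key ((cur &&& (1 <<< 250001 - 1)).testBit (q / 2)) (sn.testBit (q / 2))
    (decide (q % 2 = 0)) (hsubm _)

theorem m_sub (s : Int) (t : Nat) (cur : Nat) (hc : CURinv s t cur) :
    SUBinv s (t + 1) ((t : Int) % 2) (cur &&& (1 <<< 250001 - 1)) := by
  intro i hi
  rw [Nat.testBit_land, Nat.one_shiftLeft, Nat.testBit_two_pow_sub_one, hc i] at hi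
  simp only [Bool.and_eq_true, decide_eq_true_iff] at hi
  refine ⟨by omega, ?_⟩
  rw [Wd_mono s t (t + 1) (by omega) (i : Int) _ (by positivity) hi.1.2]
  exact hi.1.2

theorem cur_step (s : Int) (hs : 0 ≤ s) (hs1 : s ≤ 500000) (t : Nat) (cur d' : Nat)
    (hc : CURinv s t cur)
    (hd : EQinv (cur &&& (1 <<< 250001 - 1)) d') :
    CURinv s (t + 1) ((((cur <<< 1) ||| (cur >>> 1)) &&& (1 <<< 500001 - 1)) ||| d') := by
  intro q
  have hmbit : (cur &&& (1 <<< 250001 - 1)).testBit (q / 2) =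
      (cur.testBit (q / 2) && decide (q / 2 < 250001)) := by
    rw [Nat.testBit_land, Nat.one_shiftLeft, Nat.testBit_two_pow_sub_one]
  rw [Nat.testBit_lor, Nat.testBit_land, Nat.one_shiftLeft, Nat.testBit_two_pow_sub_one,
    Nat.testBit_lor, Nat.testBit_shiftLeft, Nat.testBit_shiftRight, hd q, hmbit,
    hc (q - 1), hc (1 + q), hc (q / 2)]
  have hcast : (((t + 1 : Nat)) : Int) % 2 = ((t : Int) + 1) % 2 := by push_cast; ring_nf
  rw [Bool.eq_iff_iff]
  simp only [Bool.or_eq_true, Bool.and_eq_true, decide_eq_true_iff, hcast]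
  constructor
  · rintro (⟨⟨h1, hP⟩ | hP, hq5⟩ | ⟨hq2, hP, h25⟩)
    · have hq5' : (q : Int) ≤ 500000 := by omega
      refine ⟨hq5', (Vstep s hs hs1 t (q : Int) (by positivity) hq5').mpr ?_⟩
      refine ⟨((q - 1 : Nat) : Int), by positivity, hP.1, hP.2, Or.inr (Or.inl (by omega))⟩
    · have hq5' : (q : Int) ≤ 500000 := by omega
      refine ⟨hq5', (Vstep s hs hs1 t (q : Int) (by positivity) hq5').mpr ?_⟩
      refine ⟨((1 + q : Nat) : Int), by positivity, hP.1, hP.2, Or.inl (by omega)⟩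
    · have hq5' : (q : Int) ≤ 500000 := by omega
      refine ⟨hq5', (Vstep s hs hs1 t (q : Int) (by positivity) hq5').mpr ?_⟩
      refine ⟨((q / 2 : Nat) : Int), by positivity, hP.1, hP.2, Or.inr (Or.inr (by omega))⟩
  · rintro ⟨hq5, hvis⟩
    obtain ⟨p, hp0, hp1, hpv, hmv⟩ :=
      (Vstep s hs hs1 t (q : Int) (by positivity) hq5).mp hvis
    rcases hmv with he | he | he
    · refine Or.inl ⟨Or.inr ?_, by omega⟩
      have hpe : ((1 + q : Nat) : Int) = p := by omega
      rw [hpe]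
      exact ⟨hp1, hpv⟩
    · refine Or.inl ⟨Or.inl ⟨by omega, ?_⟩, by omega⟩
      have hpe : ((q - 1 : Nat) : Int) = p := by omega
      rw [hpe]
      exact ⟨hp1, hpv⟩
    · refine Or.inr ⟨by omega, ?_, by omega⟩
      have hpe : ((q / 2 : Nat) : Int) = p := by omega
      rw [hpe]
      exact ⟨hp1, hpv⟩

theorem CURinv_zero (s : Int) (hs : 0 ≤ s) (hs1 : s ≤ 500000) :
    CURinv s 0 (1 <<< s.toNat) := by
  intro i
  rw [Nat.one_shiftLeft, Nat.testBit_two_pow]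
  have hsl : ((0 : Nat) : Int) % 2 = 0 := by norm_num
  rw [hsl, W0_char s hs hs1 (i : Int) 0 (by positivity)]
  by_cases hi : (i : Int) = s
  · have h1 : s.toNat = i := by omega
    rw [if_pos ⟨hi, rfl⟩]
    simp [h1]
    omega
  · have h1 : ¬ (s.toNat = i) := by omega
    rw [if_neg (by tauto)]
    simp [h1]

-- A's one level equals blevel (same writes, frontier carried with its time)
theorem apush_bpush (d : Int) (v : Array (Int × Int)) (nf : List Int) (cands : List Int)
    (hv : INV v) (hd : 0 ≤ d) :
    apush d v (nf.map (fun p => (p, d))) cands =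
      ((bpush d v nf cands).1.map (fun p => (p, d)), (bpush d v nf cands).2) := by
  induction cands generalizing v nf with
  | nil => rfl
  | cons np rest ih =>
    by_cases h1 : np < 0 ∨ np > 500000
    · have h2 : ¬(0 ≤ np ∧ np ≤ 500000 ∧ vget v np (d % 2) = -1) := by
        rintro ⟨a, b, c⟩; omega
      simp only [apush, bpush, if_pos h1, if_neg h2]
      exact ih v nf hv
    · by_cases h3 : vget v np (d % 2) > -1
      · have h2 : ¬(0 ≤ np ∧ np ≤ 500000 ∧ vget v np (d % 2) = -1) := by
          rintro ⟨a, b, c⟩; omega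
        simp only [apush, bpush, if_neg h1, if_pos h3, if_neg h2]
        exact ih v nf hv
      · have heq : vget v np (d % 2) = -1 := by have := hv np (d % 2); omega
        have h2 : 0 ≤ np ∧ np ≤ 500000 ∧ vget v np (d % 2) = -1 := by
          constructor
          · omega
          · exact ⟨by omega, heq⟩
        simp only [apush, bpush, if_neg h1, if_neg h3, if_pos h2]
        have hmap : (np, d) :: nf.map (fun p => (p, d)) = (np :: nf).map (fun p => (p, d)) := rfl
        rw [hmap]
        exact ih (vset v np (d % 2) d) (np :: nf) (INV_vset _ _ _ _ hv (by omega))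

theorem alevel_blevel (t : Int) (f : List Int) (v : Array (Int × Int)) (nf : List Int)
    (time0 : Int) (hv : INV v) (ht : 0 ≤ t) :
    alevel (f.map (fun p => (p, t))) v (nf.map (fun p => (p, t + 1))) time0 =
      ((blevel (t + 1) f v nf).1.map (fun p => (p, t + 1)), (blevel (t + 1) f v nf).2,
        if f = [] then time0 else t + 1) := by
  induction f generalizing v nf time0 with
  | nil =>
    simp only [List.map_nil, alevel, blevel]
    rw [List.map_reverse]
    simp
  | cons p rest ih =>
    simp only [List.map_cons, alevel, blevel]
    rw [apush_bpush (t + 1) v nf [p - 1, p + 1, p * 2] hv (by omega)]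
    have := ih (bpush (t + 1) v nf [p - 1, p + 1, p * 2]).2
      (bpush (t + 1) v nf [p - 1, p + 1, p * 2]).1 (t + 1)
      (INV_bpush (t + 1) v nf _ hv (by omega))
    rw [this]
    simp

-- the B-side visited check agrees with A's table check
theorem check_iff (s : Int) (t : Nat) (cur : Nat) (b : Int) (hb : 0 ≤ b)
    (hc : CURinv s t cur) :
    ((b ≤ 500000 ∧ (cur >>> b.toNat) &&& 1 = 1) ↔
      (b ≤ 500000 ∧ 0 ≤ vget (Wd s t) b ((t : Int) % 2))) := by
  have hcast : ((b.toNat : Nat) : Int) = b := Int.toNat_of_nonneg hb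
  rw [land_one_iff, hc b.toNat, hcast]
  simp only [Bool.and_eq_true, decide_eq_true_iff]
  tauto

-- one unfolding step of A's loop
theorem aloop_cons (fuel : Nat) (s0 tm : Int) (rest : List (Int × Int))
    (v : Array (Int × Int)) (brother : Int) :
    aloop (fuel + 1) ((s0, tm) :: rest) v brother =
      (if brother + (alevel ((s0, tm) :: rest) v [] 0).2.2 > 500000 then -1
       else
         if vget (alevel ((s0, tm) :: rest) v [] 0).2.1
              (brother + (alevel ((s0, tm) :: rest) v [] 0).2.2)
              ((alevel ((s0, tm) :: rest) v [] 0).2.2 % 2) ≥ 0 then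
           (alevel ((s0, tm) :: rest) v [] 0).2.2
         else
           aloop fuel (alevel ((s0, tm) :: rest) v [] 0).1
             (alevel ((s0, tm) :: rest) v [] 0).2.1
             (brother + (alevel ((s0, tm) :: rest) v [] 0).2.2)) := rfl

-- one unfolding step of B's loop (the lets of the port, zeta-reduced)
theorem bloop_eq (fuel : Nat) (t brother : Int) (cur s0 s1 d0 d1 : Nat) (b0 : Int) :
    bloop (fuel + 1) t brother cur s0 s1 d0 d1 b0 =
      if brother ≤ 500000 ∧ (cur >>> brother.toNat) &&& 1 = 1 then t
      else
        if b0 + (t + 1) * (t + 1 + 1) / 2 > 500000 then -1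
        else
          bloop fuel (t + 1) (b0 + (t + 1) * (t + 1 + 1) / 2)
            ((((cur <<< 1) ||| (cur >>> 1)) &&& (1 <<< 500001 - 1)) |||
              dblLoop ((cur &&& (1 <<< 250001 - 1)) ^^^
                ((cur &&& (1 <<< 250001 - 1)) &&& (if t % 2 = 0 then s0 else s1)))
                (if t % 2 = 0 then d1 else d0))
            (if t % 2 = 0 then cur &&& (1 <<< 250001 - 1) else s0)
            (if t % 2 = 0 then s1 else cur &&& (1 <<< 250001 - 1))
            (if t % 2 = 0 then d0 else
              dblLoop ((cur &&& (1 <<< 250001 - 1)) ^^^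
                ((cur &&& (1 <<< 250001 - 1)) &&& (if t % 2 = 0 then s0 else s1)))
                (if t % 2 = 0 then d1 else d0))
            (if t % 2 = 0 then
              dblLoop ((cur &&& (1 <<< 250001 - 1)) ^^^
                ((cur &&& (1 <<< 250001 - 1)) &&& (if t % 2 = 0 then s0 else s1)))
                (if t % 2 = 0 then d1 else d0)
              else d1)
            b0 := rfl

theorem zero_SUBinv (s : Int) (t : Nat) (rho : Int) : SUBinv s t rho 0 := by
  intro i hi
  simp [Nat.zero_testBit] at hi

theorem zero_EQinv : EQinv 0 0 := by
  intro q
  simp [Nat.zero_testBit]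

-- ---------- main induction ----------
theorem main_ind (s b0 : Int) (hs : 0 ≤ s) (hs1 : s ≤ 500000) (hb : 0 ≤ b0) :
    ∀ n t (f : List Int) (v : Array (Int × Int)) (cur s0 s1 d0 d1 : Nat),
      st s t = ((t : Int), f, v) → f ≠ [] → n + t = 70000 →
      b0 + (t : Int) * ((t : Int) + 1) / 2 ≤ 500000 →
      CURinv s t cur → SUBinv s t 0 s0 → SUBinv s t 1 s1 → EQinv s0 d1 → EQinv s1 d0 →
      vget (Wd s t) (b0 + (t : Int) * ((t : Int) + 1) / 2) ((t : Int) % 2) < 0 →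
      aloop n (f.map (fun p => (p, (t : Int)))) v (b0 + (t : Int) * ((t : Int) + 1) / 2) =
        bloop (n + 1) (t : Int) (b0 + (t : Int) * ((t : Int) + 1) / 2) cur s0 s1 d0 d1 b0 := by
  intro n
  induction n with
  | zero =>
    intro t f v cur s0 s1 d0 d1 hst hf hnt htri hcur hsub0 hsub1 heq1 heq0 hchk
    exfalso
    have ht : t = 70000 := by omega
    subst ht
    have h1 : (1000 : Int) * (1000 + 1) / 2 ≤ (70000 : Int) * ((70000 : Int) + 1) / 2 :=
      tri_mono 1000 70000 (by norm_num) (by norm_num)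
    have hc : (1000 : Int) * (1000 + 1) / 2 = 500500 := by norm_num
    push_cast at htri
    omega
  | succ m ih =>
    intro t f v cur s0 s1 d0 d1 hst hf hnt htri hcur hsub0 hsub1 heq1 heq0 hchk
    rcases f with _ | ⟨p0, rest⟩
    · exact absurd rfl hf
    have hIV : INV v := by have := INV_Wd s t; rwa [Wd, hst] at this
    have hbr0 : 0 ≤ b0 + (t : Int) * ((t : Int) + 1) / 2 := by
      have h0 := tri_mono 0 (t : Int) (by norm_num) (by positivity)
      norm_num at h0
      omega
    -- B: the check at time t fails
    have hcond1 : ¬ (b0 + (t : Int) * ((t : Int) + 1) / 2 ≤ 500000 ∧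
        (cur >>> (b0 + (t : Int) * ((t : Int) + 1) / 2).toNat) &&& 1 = 1) := by
      intro hcc
      have := (check_iff s t cur _ hbr0 hcur).mp hcc
      omega
    rw [bloop_eq, if_neg hcond1]
    -- A: one level
    have hAL := alevel_blevel (t : Int) (p0 :: rest) v [] 0 hIV (by positivity)
    simp only [List.map_nil] at hAL
    simp only [List.map_cons] at hAL ⊢
    simp only [aloop, hAL]
    have hcons : (p0 :: rest : List Int) = [] ↔ False := by simp
    simp only [hcons, if_false]
    have heq : b0 + (t : Int) * ((t : Int) + 1) / 2 + ((t : Int) + 1) =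
        b0 + ((t : Int) + 1) * ((t : Int) + 1 + 1) / 2 := by
      have h1 := tri_step (t : Int)
      have h2 : ((t : Int) + 1) * ((t : Int) + 1 + 1) = ((t : Int) + 1) * ((t : Int) + 2) := by ring
      omega
    rw [heq]
    set NF := (blevel ((t : Int) + 1) (p0 :: rest) v []).1 with hNFdef
    set V' := (blevel ((t : Int) + 1) (p0 :: rest) v []).2 with hVdef
    have hst' : st s (t + 1) = ((t : Int) + 1, NF, V') := by
      rw [st_succ, hst, stepB_cons]
    have hW1 : Wd s (t + 1) = V' := by rw [Wd, hst']
    have hcast : ((t + 1 : Nat) : Int) = (t : Int) + 1 := by push_cast; ring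
    -- the updated B state and its invariants
    have hmono0 : SUBinv s (t + 1) 0 s0 := SUBinv_mono s t 0 s0 hsub0
    have hmono1 : SUBinv s (t + 1) 1 s1 := SUBinv_mono s t 1 s1 hsub1
    by_cases hpar : (t : Int) % 2 = 0
    case pos =>
      have hifN : ∀ (a b : Nat), (if (t : Int) % 2 = 0 then a else b) = a := fun a b => if_pos hpar
      simp only [hifN]
      have hEQ : EQinv (cur &&& (1 <<< 250001 - 1))
          (dblLoop ((cur &&& (1 <<< 250001 - 1)) ^^^ ((cur &&& (1 <<< 250001 - 1)) &&& s0)) d1) :=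
        dbl_update s t cur s0 d1 hcur (by rwa [hpar]) heq1
      have hcur' := cur_step s hs hs1 t cur _ hcur hEQ
      have hm_sub : SUBinv s (t + 1) 0 (cur &&& (1 <<< 250001 - 1)) := by
        have := m_sub s t cur hcur
        rwa [hpar] at this
      by_cases hgt : b0 + ((t : Int) + 1) * ((t : Int) + 1 + 1) / 2 > 500000
      · rw [if_pos hgt, if_pos hgt]
      · rw [if_neg hgt, if_neg hgt]
        by_cases hvis : 0 ≤ vget V' (b0 + ((t : Int) + 1) * ((t : Int) + 1 + 1) / 2) (((t : Int) + 1) % 2)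
        · rw [if_pos (by omega : vget V' (b0 + ((t : Int) + 1) * ((t : Int) + 1 + 1) / 2) (((t : Int) + 1) % 2) ≥ 0)]
          rw [bloop_eq, if_pos]
          refine (check_iff s (t + 1) _ _ (by omega) hcur').mpr ?_
          rw [hcast, hW1]
          exact ⟨by omega, hvis⟩
        · rw [if_neg (by omega : ¬ vget V' (b0 + ((t : Int) + 1) * ((t : Int) + 1 + 1) / 2) (((t : Int) + 1) % 2) ≥ 0)]
          rcases hNF : NF with _ | ⟨p1, rest1⟩
          · exfalso
            apply hvis
            rw [← hW1]
            refine complete_of_empty s hs hs1 (t + 1) (by rw [Fr, hst', hNF]) _ _ (by omega) (by omega) (by omega)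
          · have hih := ih (t + 1) NF V' _ _ _ _ _ (by rw [hst', hcast]) (by rw [hNF]; simp)
              (by omega)
              (by rw [hcast]; omega)
              hcur' hm_sub hmono1 hEQ heq0
              (by rw [hcast, hW1]
                  have := INV_Wd s (t + 1)
                  rw [hW1] at this
                  have h2 := this (b0 + ((t : Int) + 1) * ((t : Int) + 1 + 1) / 2) (((t : Int) + 1) % 2)
                  omega)
            rw [hcast] at hih
            rw [← hNF]
            exact hih
    case neg =>
      have hifN : ∀ (a b : Nat), (if (t : Int) % 2 = 0 then a else b) = b := fun a b => if_neg hpar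
      simp only [hifN]
      have hpar1 : (t : Int) % 2 = 1 := by omega
      have hEQ : EQinv (cur &&& (1 <<< 250001 - 1))
          (dblLoop ((cur &&& (1 <<< 250001 - 1)) ^^^ ((cur &&& (1 <<< 250001 - 1)) &&& s1)) d0) :=
        dbl_update s t cur s1 d0 hcur (by rwa [hpar1]) heq0
      have hcur' := cur_step s hs hs1 t cur _ hcur hEQ
      have hm_sub : SUBinv s (t + 1) 1 (cur &&& (1 <<< 250001 - 1)) := by
        have := m_sub s t cur hcur
        rwa [hpar1] at this
      by_cases hgt : b0 + ((t : Int) + 1) * ((t : Int) + 1 + 1) / 2 > 500000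
      · rw [if_pos hgt, if_pos hgt]
      · rw [if_neg hgt, if_neg hgt]
        by_cases hvis : 0 ≤ vget V' (b0 + ((t : Int) + 1) * ((t : Int) + 1 + 1) / 2) (((t : Int) + 1) % 2)
        · rw [if_pos (by omega : vget V' (b0 + ((t : Int) + 1) * ((t : Int) + 1 + 1) / 2) (((t : Int) + 1) % 2) ≥ 0)]
          rw [bloop_eq, if_pos]
          refine (check_iff s (t + 1) _ _ (by omega) hcur').mpr ?_
          rw [hcast, hW1]
          exact ⟨by omega, hvis⟩
        · rw [if_neg (by omega : ¬ vget V' (b0 + ((t : Int) + 1) * ((t : Int) + 1 + 1) / 2) (((t : Int) + 1) % 2) ≥ 0)]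
          rcases hNF : NF with _ | ⟨p1, rest1⟩
          · exfalso
            apply hvis
            rw [← hW1]
            refine complete_of_empty s hs hs1 (t + 1) (by rw [Fr, hst', hNF]) _ _ (by omega) (by omega) (by omega)
          · have hih := ih (t + 1) NF V' _ _ _ _ _ (by rw [hst', hcast]) (by rw [hNF]; simp)
              (by omega)
              (by rw [hcast]; omega)
              hcur' hmono0 hm_sub heq1 hEQ
              (by rw [hcast, hW1]
                  have := INV_Wd s (t + 1)
                  rw [hW1] at this
                  have h2 := this (b0 + ((t : Int) + 1) * ((t : Int) + 1 + 1) / 2) (((t : Int) + 1) % 2)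
                  omega)
            rw [hcast] at hih
            rw [← hNF]
            exact hih

-- ===== VERDICT (by name: the statement is the Claim_ definition above) =====
theorem solution_spec : Claim_equal_solution := by
  unfold Claim_equal_solution
  intro s b0 hdom hpre
  obtain ⟨hs, hs1, hb⟩ := hpre
  unfold Spec_solution solution solution_alt
  have hcurz : CURinv s 0 (1 <<< s.toNat) := CURinv_zero s hs hs1
  have hsl0 : ((0 : Nat) : Int) % 2 = 0 := by norm_num
  rw [show (70001 : Nat) = 70000 + 1 from rfl]
  by_cases hsb : s = b0
  · rw [if_pos hsb, bloop_eq, if_pos]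
    refine (check_iff s 0 _ b0 hb hcurz).mpr ⟨by omega, ?_⟩
    rw [hsl0, W0_char s hs hs1 b0 0 hb, if_pos ⟨hsb.symm, rfl⟩]
  · rw [if_neg hsb]
    have hW0 : vget (Wd s 0) b0 0 = -1 := by
      rw [W0_char s hs hs1 b0 0 hb, if_neg (by tauto)]
    have hcond1 : ¬ (b0 ≤ 500000 ∧ ((1 <<< s.toNat) >>> b0.toNat) &&& 1 = 1) := by
      intro hcc
      have := (check_iff s 0 _ b0 hb hcurz).mp hcc
      rw [hsl0] at this
      omega
    by_cases hbig : b0 > 500000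
    · -- both return -1 in the first round
      rw [bloop_eq, if_neg hcond1, if_pos (by omega : b0 + (0 + 1) * (0 + 1 + 1) / 2 > 500000)]
      have hIV : INV (initV s) := by have := INV_Wd s 0; rwa [Wd_zero] at this
      have hAL := alevel_blevel (0 : Int) [s] (initV s) [] 0 hIV (by norm_num)
      simp only [List.map_nil, List.map_cons] at hAL
      rw [show (70000 : Nat) = 69999 + 1 from rfl,
        show vset (Array.replicate 500001 ((-1 : Int), (-1 : Int))) s 0 0 = initV s from rfl,
        aloop_cons, hAL]
      norm_num
      omega
    · have hmain := main_ind s b0 hs hs1 hb 70000 0 [s] (initV s) (1 <<< s.toNat) 0 0 0 0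
        (by rw [st_zero]; norm_num)
        (by simp)
        (by omega)
        (by norm_num; omega)
        hcurz (zero_SUBinv s 0 0) (zero_SUBinv s 0 1) zero_EQinv zero_EQinv
        (by rw [hsl0]
            norm_num
            rw [hW0]
            norm_num)
      norm_num at hmain
      rw [initV] at hmain
      exact hmain
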